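-- pv_equiv track=rewrite | github.com/kovzhu/real-estate | Lianjia data on sale.py | url_generator_for_all
-- ===== SOURCE A (Python) =====
-- def url_generator_for_all(url, pages):
--     # generate a list of urls for all the pages in a region/sub-region
--     pageinfo = ['']
--     url_list = []
--     if pages > 2:
--         for i in range(2, pages + 1):
--             pageinfo.append('pg' + str(i) + r'/')
--         for i in pageinfo:
--             url_full = url + i
--             url_list.append(url_full)
--         return url_list
--     elif pages == 1:
--         url_list.append(url)
--     elif pages == 2:
--         url_list.append(url)
--         url_list.append(url + 'pg2/')
--     return url_list
-- ===== SOURCE B (Python) =====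
-- def url_generator_for_all(url, pages):
--     # generate a list of urls for all the pages in a region/sub-region
--     if pages < 1:
--         return []
--     return [url] + [url + 'pg' + str(i) + '/' for i in range(2, pages + 1)]
-- ===== Notes on version B (the rewrite author's own statement) =====
-- stated objective: simpler
-- what changed: Replaced the three-way branch with its pageinfo intermediate list and two accumulation loops by a single guarded comprehension that covers pages==1, pages==2 and pages>2 uniformly.
import Mathlib
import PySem

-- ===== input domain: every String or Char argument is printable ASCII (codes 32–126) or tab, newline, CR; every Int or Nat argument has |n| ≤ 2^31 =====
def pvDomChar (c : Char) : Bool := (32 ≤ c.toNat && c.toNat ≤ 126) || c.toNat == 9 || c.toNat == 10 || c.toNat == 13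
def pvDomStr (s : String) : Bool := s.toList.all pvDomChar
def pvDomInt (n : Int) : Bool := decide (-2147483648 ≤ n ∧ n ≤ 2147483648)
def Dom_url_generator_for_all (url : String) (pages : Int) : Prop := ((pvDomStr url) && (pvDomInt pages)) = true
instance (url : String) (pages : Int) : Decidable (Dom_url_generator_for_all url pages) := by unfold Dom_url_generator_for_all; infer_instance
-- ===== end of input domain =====

-- B replaces the three-way branch and two loops by one guarded comprehension (objective: simpler).
-- ===== PORT A =====
def url_generator_for_all (url : String) (pages : Int) : List String :=
  let pageinfo : List String := [""]
  let url_list : List String := []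
  if pages > 2 then
    let pageinfo := (PySem.List.pyRange 2 (pages + 1) 1).foldl
      (fun acc i => acc ++ ["pg" ++ PySem.Int.toStr i ++ "/"]) pageinfo
    let url_list := pageinfo.foldl (fun acc i => acc ++ [url ++ i]) url_list
    url_list
  else if pages = 1 then
    url_list ++ [url]
  else if pages = 2 then
    (url_list ++ [url]) ++ [url ++ "pg2/"]
  else
    url_list

-- ===== PORT B =====
def url_generator_for_all_alt (url : String) (pages : Int) : List String :=
  if pages < 1 then []
  else url :: (PySem.List.pyRange 2 (pages + 1) 1).map
    (fun i => url ++ "pg" ++ PySem.Int.toStr i ++ "/")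

-- ===== PRECONDITION & SPEC =====
def Spec_url_generator_for_all (url : String) (pages : Int) (out : List String) : Prop := out = url_generator_for_all_alt url pages
instance (url : String) (pages : Int) (out : List String) : Decidable (Spec_url_generator_for_all url pages out) := by unfold Spec_url_generator_for_all; infer_instance

-- ===== CLAIM (what is proved, stated in full; the proofs are below) =====
def Claim_equal_url_generator_for_all : Prop := ∀ (url : String) (pages : Int), Dom_url_generator_for_all url pages → Spec_url_generator_for_all url pages (url_generator_for_all url pages)

-- ===== LEMMAS AND PROOFS =====

-- ===== VERDICT (by name: the statement is the Claim_ definition above) =====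
theorem url_generator_for_all_spec : Claim_equal_url_generator_for_all := by
  intro url pages _
  unfold Spec_url_generator_for_all url_generator_for_all url_generator_for_all_alt
  by_cases h3 : pages > 2
  · simp only [h3, if_pos, if_neg (by omega : ¬ pages < 1)]
    rw [PySem.List.foldl_append_singleton_eq_map, PySem.List.foldl_append_singleton_eq_map]
    simp [String.append_assoc]
  · by_cases h1 : pages = 1
    · subst h1
      norm_num [PySem.List.pyRange]
    · by_cases h2 : pages = 2
      · subst h2
        norm_num [PySem.List.pyRange_one_cons (by norm_num : (2:Int) < 3), PySem.List.pyRange]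
        rw [show ("pg2/" : String) = "pg" ++ PySem.Int.toStr 2 ++ "/" from by decide,
            String.append_assoc, String.append_assoc]
        simp [String.append_assoc]
      · simp [if_neg h3, if_neg h1, if_neg h2, if_pos (by omega : pages < 1)]
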